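-- pv_equiv track=rewrite | github.com/cu-sage/sage-frontend | recommendationEngine/teacher_recommendation.py | compute_mastery
-- ===== SOURCE A (Python) =====
-- def compute_mastery(all_games, class_games, class_final_score):
--     mastery = {}
--     for game in class_games:
--         score = class_final_score[game]
--         b = all_games.get(game)
--         c = b['ctConcepts']
--         for ct in c:
--             if ct not in mastery or mastery.get(ct) < score:
--                 mastery[ct] = score
--     return mastery
-- ===== SOURCE B (Python) =====
-- def compute_mastery(all_games, class_games, class_final_score):
--     pairs = []
--     for game in class_games:
--         score = class_final_score[game]
--         for ct in all_games.get(game)['ctConcepts']: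
--             pairs.append((ct, score))
--     order = []
--     for ct, _ in pairs:
--         if ct not in order:
--             order.append(ct)
--     return {ct: max(s for c, s in pairs if c == ct) for ct in order}
-- ===== Notes on version B (the rewrite author's own statement) =====
-- stated objective: alternative
-- what changed: A interleaves a running-max dict update inside the game/concept loops; B first flattens everything into a (concept, score) pair list, then computes the first-occurrence key order, then builds the result by taking max over a filter of the flat list per key.
import Mathlib
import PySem

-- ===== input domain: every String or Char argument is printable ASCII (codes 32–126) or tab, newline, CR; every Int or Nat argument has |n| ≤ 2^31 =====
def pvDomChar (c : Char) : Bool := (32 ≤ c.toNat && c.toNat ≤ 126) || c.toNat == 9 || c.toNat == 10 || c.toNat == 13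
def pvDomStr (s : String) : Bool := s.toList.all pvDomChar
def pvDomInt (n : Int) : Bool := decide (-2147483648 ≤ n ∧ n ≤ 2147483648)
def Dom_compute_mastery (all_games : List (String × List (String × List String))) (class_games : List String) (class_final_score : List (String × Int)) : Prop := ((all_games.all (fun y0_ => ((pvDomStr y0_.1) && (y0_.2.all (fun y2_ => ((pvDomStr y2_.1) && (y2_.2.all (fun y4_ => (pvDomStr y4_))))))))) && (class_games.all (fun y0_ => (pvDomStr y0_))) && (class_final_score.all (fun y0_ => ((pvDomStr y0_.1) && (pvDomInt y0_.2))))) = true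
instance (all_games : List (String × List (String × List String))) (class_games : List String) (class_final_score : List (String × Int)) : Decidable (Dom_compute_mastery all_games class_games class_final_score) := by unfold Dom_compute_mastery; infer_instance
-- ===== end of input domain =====

-- B replaces A's interleaved running-max dict with three staged passes (flatten to a (concept, score) pair list, compute first-occurrence key order, then take a max over a filter of the pair list per key); objective: alternative decomposition, same cost up to the per-key filter scans.


-- ===== PORT A =====
-- inner-loop body of A: 'if ct not in mastery or mastery.get(ct) < score: mastery[ct] = score'
def pvStepA (score : Int) (m : PySem.Dict String Int) (ct : String) : PySem.Dict String Int :=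
  match m.get? ct with
  | none => m.insert ct score
  | some v => if v < score then m.insert ct score else m

-- A's lookups class_final_score[game] / all_games.get(game) / b['ctConcepts'] are first-match
-- association-list lookups; the '.getD' defaults are reached exactly where Python raises (excluded by Pre_).
def compute_mastery (all_games : List (String × List (String × List String))) (class_games : List String) (class_final_score : List (String × Int)) : List (String × Int) :=
  (class_games.foldl (fun mastery game =>
      let score := ((PySem.Dict.mk class_final_score).get? game).getD 0
      let b := ((PySem.Dict.mk all_games).get? game).getD []
      let c := ((PySem.Dict.mk b).get? "ctConcepts").getD []
      c.foldl (pvStepA score) mastery)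
    PySem.Dict.empty).items

-- ===== PORT B =====
-- max(...) over B's generator of the filtered scores (nonempty for every key of 'order', so the default is never reached)
def pvMaxD (l : List Int) : Int := (PySem.List.max? l (fun y => y)).getD 0

-- B: pass 1 flattens the loops into a flat (ct, score) pair list; pass 2 collects the keys in
-- first-occurrence order; pass 3 builds the result taking max over a filter of the pair list per key.
def compute_mastery_alt (all_games : List (String × List (String × List String))) (class_games : List String) (class_final_score : List (String × Int)) : List (String × Int) :=
  let pairs := class_games.foldl (fun acc game =>
      let score := ((PySem.Dict.mk class_final_score).get? game).getD 0
      (((PySem.Dict.mk (((PySem.Dict.mk all_games).get? game).getD [])).get? "ctConcepts").getD []).foldl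
        (fun acc ct => acc ++ [(ct, score)]) acc) []
  let order := pairs.foldl (fun o p => if o.contains p.1 then o else o ++ [p.1]) []
  order.map (fun ct => (ct, pvMaxD ((pairs.filter (fun p => p.1 == ct)).map (fun p => p.2))))

-- ===== PRECONDITION & SPEC =====
-- Pre_ excludes exactly the inputs where A raises: a game of class_games missing from
-- class_final_score (KeyError), missing from all_games (TypeError on None['ctConcepts']),
-- or whose all_games entry lacks the key 'ctConcepts' (KeyError).
def Pre_compute_mastery (all_games : List (String × List (String × List String))) (class_games : List String) (class_final_score : List (String × Int)) : Prop :=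
  (class_games.all (fun game =>
    (PySem.Dict.mk class_final_score).contains game &&
    (match (PySem.Dict.mk all_games).get? game with
     | some b => (PySem.Dict.mk b).contains "ctConcepts"
     | none => false))) = true
instance (all_games : List (String × List (String × List String))) (class_games : List String) (class_final_score : List (String × Int)) : Decidable (Pre_compute_mastery all_games class_games class_final_score) := by unfold Pre_compute_mastery; infer_instance

def pvWitness_compute_mastery : (List (String × List (String × List String))) × List String × (List (String × Int)) :=
  ([("g1", [("ctConcepts", ["loops", "vars"])]), ("g2", [("ctConcepts", ["loops"])])], ["g1", "g2"], [("g1", 3), ("g2", 7)])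

def Spec_compute_mastery (all_games : List (String × List (String × List String))) (class_games : List String) (class_final_score : List (String × Int)) (out : List (String × Int)) : Prop := out = compute_mastery_alt all_games class_games class_final_score
instance (all_games : List (String × List (String × List String))) (class_games : List String) (class_final_score : List (String × Int)) (out : List (String × Int)) : Decidable (Spec_compute_mastery all_games class_games class_final_score out) := by unfold Spec_compute_mastery; infer_instance

-- ===== CLAIM (what is proved, stated in full; the proofs are below) =====
def Claim_equal_compute_mastery : Prop := ∀ (all_games : List (String × List (String × List String))) (class_games : List String) (class_final_score : List (String × Int)), Dom_compute_mastery all_games class_games class_final_score → Pre_compute_mastery all_games class_games class_final_score → Spec_compute_mastery all_games class_games class_final_score (compute_mastery all_games class_games class_final_score)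

-- ===== LEMMAS AND PROOFS =====

-- B's pass-2 key order and pass-3 per-key max, as functions of the flat pair list
def pvOrder (ps : List (String × Int)) : List String :=
  ps.foldl (fun o p => if o.contains p.1 then o else o ++ [p.1]) []
def pvMaxF (ps : List (String × Int)) (ct : String) : Int :=
  pvMaxD ((ps.filter (fun p => p.1 == ct)).map (fun p => p.2))

lemma pvfold (f : Option Int → Int → Option Int)
    (hf : ∀ m x, f (some m) x = if m < x then some x else some m)
    (t : List Int) (m : Int) :
    List.foldl f (some m) t = some (t.foldl (fun a b => if a < b then b else a) m) := by
  induction t generalizing m with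
  | nil => rfl
  | cons a t ih =>
    simp only [List.foldl_cons, hf]
    by_cases hma : m < a <;> simp only [hma, if_pos, ite_false] <;> rw [ih]
lemma pvMaxD_cons (a : Int) (t : List Int) :
    pvMaxD (a :: t) = t.foldl (fun a b => if a < b then b else a) a := by
  unfold pvMaxD PySem.List.max?
  simp only [List.foldl_cons]
  rw [pvfold _ (fun m x => rfl) t a]
  exact Option.getD_some
lemma pvMaxD_append (l : List Int) (x : Int) (h : l ≠ []) :
    pvMaxD (l ++ [x]) = if pvMaxD l < x then x else pvMaxD l := by
  cases l with
  | nil => exact absurd rfl h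
  | cons a t =>
    rw [List.cons_append, pvMaxD_cons, pvMaxD_cons, List.foldl_append]
    rfl

-- flattening A's nested loops into one fold over the flat pair list
lemma pvFlatA (sc : String → Int) (cc : String → List String) (cg : List String)
    (m : PySem.Dict String Int) :
    cg.foldl (fun m g => (cc g).foldl (pvStepA (sc g)) m) m
      = (cg.flatMap (fun g => (cc g).map (fun ct => (ct, sc g)))).foldl
          (fun m p => pvStepA p.2 m p.1) m := by
  induction cg generalizing m with
  | nil => rfl
  | cons a t ih =>
    simp only [List.foldl_cons, List.flatMap_cons, List.foldl_append, List.foldl_map]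
    exact ih _

-- flattening B's pair-building loops into the same flat pair list
lemma pvAppendFold {α β : Type} (f : α → β) (l : List α) (acc : List β) :
    l.foldl (fun a x => a ++ [f x]) acc = acc ++ l.map f := by
  induction l generalizing acc with
  | nil => simp
  | cons a t ih => simp [ih]
lemma pvFoldFlat {α β : Type} (f : α → List β) (l : List α) (acc : List β) :
    l.foldl (fun a x => a ++ f x) acc = acc ++ l.flatMap f := by
  induction l generalizing acc with
  | nil => simp
  | cons a t ih => simp [ih]
lemma pvFlatB (sc : String → Int) (cc : String → List String) (cg : List String)
    (acc : List (String × Int)) :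
    cg.foldl (fun acc g => (cc g).foldl (fun acc ct => acc ++ [(ct, sc g)]) acc) acc
      = acc ++ cg.flatMap (fun g => (cc g).map (fun ct => (ct, sc g))) := by
  simp only [pvAppendFold]
  exact pvFoldFlat _ _ _

lemma pvOrder_append (ps : List (String × Int)) (p : String × Int) :
    pvOrder (ps ++ [p]) = if (pvOrder ps).contains p.1 then pvOrder ps else pvOrder ps ++ [p.1] := by
  simp [pvOrder, List.foldl_append]

lemma pvOrder_mem (ps : List (String × Int)) :
    ∀ c : String, c ∈ pvOrder ps ↔ c ∈ ps.map Prod.fst := by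
  induction ps using List.reverseRecOn with
  | nil => intro c; simp [pvOrder]
  | append_singleton ps p ih =>
    intro c
    rw [pvOrder_append]
    by_cases hc : p.1 ∈ pvOrder ps
    · have hcb : (pvOrder ps).contains p.1 = true := by simpa using hc
      rw [hcb]
      simp only [if_pos, List.map_append, List.map_cons, List.map_nil, List.mem_append,
        List.mem_singleton, ih]
      constructor
      · exact Or.inl
      · rintro (h | h)
        · exact h
        · exact h ▸ ((ih p.1).mp hc)
    · have hcb : (pvOrder ps).contains p.1 = false := by simpa using hc
      rw [hcb]
      simp [ih]

lemma pvOrder_nodup (ps : List (String × Int)) : (pvOrder ps).Nodup := by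
  induction ps using List.reverseRecOn with
  | nil => simp [pvOrder]
  | append_singleton ps p ih =>
    rw [pvOrder_append]
    by_cases hc : p.1 ∈ pvOrder ps
    · have hcb : (pvOrder ps).contains p.1 = true := by simpa using hc
      rw [hcb]; exact ih
    · have hcb : (pvOrder ps).contains p.1 = false := by simpa using hc
      rw [hcb]
      simp only [Bool.false_eq_true, if_false]
      rw [List.nodup_append]
      exact ⟨ih, List.nodup_singleton _, by intro a ha b hb; rw [List.mem_singleton] at hb; subst hb; exact fun he => hc (he ▸ ha)⟩

-- per-key max facts under appending one pair
lemma pvMaxF_ne (ps : List (String × Int)) (ct : String) (s : Int) (c : String) (h : c ≠ ct) :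
    pvMaxF (ps ++ [(ct, s)]) c = pvMaxF ps c := by
  unfold pvMaxF
  rw [List.filter_append]
  have hb : (ct == c) = false := by simpa using Ne.symm h
  have : List.filter (fun p => p.1 == c) [(ct, s)] = [] := by
    rw [List.filter_cons]; simp [hb]
  rw [this, List.append_nil]

lemma pvMaxF_self (ps : List (String × Int)) (ct : String) (s : Int) :
    pvMaxF (ps ++ [(ct, s)]) ct
      = if ps.filter (fun p => p.1 == ct) = [] then s
        else if pvMaxF ps ct < s then s else pvMaxF ps ct := by
  unfold pvMaxF
  rw [List.filter_append]
  have hf : List.filter (fun p => p.1 == ct) [(ct, s)] = [(ct, s)] := by simp [List.filter]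
  rw [hf, List.map_append]
  by_cases hps : ps.filter (fun p => p.1 == ct) = []
  · rw [if_pos hps, hps]
    simp only [List.map_nil, List.nil_append, List.map_cons]
    rw [pvMaxD_cons, List.foldl_nil]
  · rw [if_neg hps]
    have hne : (ps.filter (fun p => p.1 == ct)).map (fun p => p.2) ≠ [] := by
      simpa using hps
    exact pvMaxD_append _ _ hne

lemma pvMem_filter_ne (ps : List (String × Int)) (ct : String) :
    (ct ∈ ps.map Prod.fst) ↔ ps.filter (fun p => p.1 == ct) ≠ [] := by
  rw [Ne, List.filter_eq_nil_iff]
  simp [List.mem_map]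

-- the main simulation: A's fold over the flat pair list produces exactly B's order/max table
lemma pvMain (ps : List (String × Int)) :
    (ps.foldl (fun m p => pvStepA p.2 m p.1) PySem.Dict.empty).items
      = (pvOrder ps).map (fun c => (c, pvMaxF ps c)) := by
  induction ps using List.reverseRecOn with
  | nil => rfl
  | append_singleton ps p ih =>
    obtain ⟨ct, s⟩ := p
    rw [List.foldl_append]
    set M := ps.foldl (fun m p => pvStepA p.2 m p.1) PySem.Dict.empty with hM
    have hkeys : M.keys = pvOrder ps := by
      simp only [PySem.Dict.keys, ih, List.map_map]
      simp [Function.comp_def]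
    have hknd : M.keys.Nodup := by rw [hkeys]; exact pvOrder_nodup ps
    have hget : ∀ c : String, M.get? c = if c ∈ pvOrder ps then some (pvMaxF ps c) else none := by
      intro c
      by_cases hc : c ∈ pvOrder ps
      · rw [if_pos hc]
        have hmem : (c, pvMaxF ps c) ∈ M.items := by
          rw [ih]; exact List.mem_map.mpr ⟨c, hc, rfl⟩
        exact PySem.Dict.get?_of_mem_items M hmem hknd
      · rw [if_neg hc]
        rw [PySem.Dict.get?_eq_none_iff_not_mem_keys, hkeys]
        exact hc
    simp only [List.foldl_cons, List.foldl_nil]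
    show (pvStepA s M ct).items = _
    rw [pvOrder_append]
    by_cases hc : ct ∈ pvOrder ps
    · -- key already present: order unchanged
      have hcontL : (pvOrder ps).contains ct = true := by simpa using hc
      have hgetc : M.get? ct = some (pvMaxF ps ct) := by rw [hget, if_pos hc]
      have hcont : M.contains ct = true := by
        rw [PySem.Dict.contains_eq_isSome_get?, hgetc]; rfl
      have hfne : ps.filter (fun p => p.1 == ct) ≠ [] :=
        (pvMem_filter_ne ps ct).mp ((pvOrder_mem ps ct).mp hc)
      rw [hcontL, if_pos rfl]
      unfold pvStepA
      rw [hgetc]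
      show (if pvMaxF ps ct < s then M.insert ct s else M).items = _
      by_cases hlt : pvMaxF ps ct < s
      · rw [if_pos hlt, PySem.Dict.items_insert, hcont, if_pos rfl, ih, List.map_map]
        apply List.map_congr_left
        intro c _
        by_cases hcc : c = ct
        · subst hcc
          simp only [Function.comp_def, beq_self_eq_true, if_pos]
          rw [pvMaxF_self, if_neg hfne, if_pos hlt]
        · have hb : (c == ct) = false := by simpa using hcc
          simp only [Function.comp_def, hb, Bool.false_eq_true, ite_false]
          rw [pvMaxF_ne ps ct s c hcc]
      · rw [if_neg hlt, ih]
        apply List.map_congr_left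
        intro c _
        by_cases hcc : c = ct
        · subst hcc
          rw [pvMaxF_self, if_neg hfne, if_neg hlt]
        · rw [pvMaxF_ne ps ct s c hcc]
    · -- new key: appended at the end
      have hcontL : (pvOrder ps).contains ct = false := by simpa using hc
      have hgetc : M.get? ct = none := by rw [hget, if_neg hc]
      have hcont : M.contains ct = false := by
        rw [PySem.Dict.contains_eq_isSome_get?, hgetc]; rfl
      have hfe : ps.filter (fun p => p.1 == ct) = [] := by
        by_contra hne
        exact hc ((pvOrder_mem ps ct).mpr ((pvMem_filter_ne ps ct).mpr hne))
      rw [hcontL]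
      simp only [Bool.false_eq_true, ite_false]
      unfold pvStepA
      rw [hgetc]
      show (M.insert ct s).items = _
      rw [PySem.Dict.items_insert, hcont]
      simp only [Bool.false_eq_true, ite_false]
      rw [ih, List.map_append, List.map_cons, List.map_nil]
      congr 1
      · apply List.map_congr_left
        intro c hcm
        have hcc : c ≠ ct := fun h => hc (h ▸ hcm)
        rw [pvMaxF_ne ps ct s c hcc]
      · rw [pvMaxF_self, if_pos hfe]

-- ===== VERDICT (by name: the statement is the Claim_ definition above) =====
theorem compute_mastery_spec : Claim_equal_compute_mastery := by
  intro all_games class_games class_final_score _ _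
  unfold Spec_compute_mastery
  unfold compute_mastery compute_mastery_alt
  rw [pvFlatA
    (fun game => ((PySem.Dict.mk class_final_score).get? game).getD 0)
    (fun game => ((PySem.Dict.mk (((PySem.Dict.mk all_games).get? game).getD [])).get? "ctConcepts").getD [])
    class_games PySem.Dict.empty]
  rw [pvFlatB
    (fun game => ((PySem.Dict.mk class_final_score).get? game).getD 0)
    (fun game => ((PySem.Dict.mk (((PySem.Dict.mk all_games).get? game).getD [])).get? "ctConcepts").getD [])
    class_games []]
  rw [List.nil_append]
  exact pvMain _
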